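-- pv_equiv track=rewrite | github.com/wplam88/PythonBasics | exercises/ex04/quiz_redo.py | boot
-- ===== SOURCE A (Python) =====
-- def boot(word: str, begin_boot: int, end_boot: int) -> str:
--     i: int = 0
--     new_word: str = ""
--     while i < len(word):
--         if begin_boot <= i <= end_boot:
--             pass
--         else:
--             new_word += word[i]
--         i += 1
--     return new_word
-- ===== SOURCE B (Python) =====
-- def boot(word: str, begin_boot: int, end_boot: int) -> str:
--     lo = max(0, begin_boot)
--     hi = end_boot + 1
--     if hi <= lo:
--         return word
--     return word[:lo] + word[hi:]
-- ===== Notes on version B (the rewrite author's own statement) =====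
-- stated objective: faster
-- what changed: Replaces the character-by-character index scan (with quadratic repeated string concatenation) by direct slice arithmetic: clamp the removal bounds and concatenate the kept prefix and suffix.
import Mathlib
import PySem

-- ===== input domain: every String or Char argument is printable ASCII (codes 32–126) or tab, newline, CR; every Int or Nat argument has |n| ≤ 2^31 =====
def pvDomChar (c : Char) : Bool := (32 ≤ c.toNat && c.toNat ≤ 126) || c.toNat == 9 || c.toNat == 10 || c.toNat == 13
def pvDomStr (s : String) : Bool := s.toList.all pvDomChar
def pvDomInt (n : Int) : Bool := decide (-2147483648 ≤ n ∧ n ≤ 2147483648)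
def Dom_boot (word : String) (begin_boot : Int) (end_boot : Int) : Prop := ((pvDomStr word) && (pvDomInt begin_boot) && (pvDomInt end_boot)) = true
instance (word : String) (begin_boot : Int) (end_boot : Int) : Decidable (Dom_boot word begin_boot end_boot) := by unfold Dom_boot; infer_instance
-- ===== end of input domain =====

-- B replaces A's per-character index scan with slice arithmetic (kept prefix ++ kept suffix); same return value everywhere.

-- ===== PORT A =====
-- while i < len(word): if begin <= i <= end: pass else: new_word += word[i]; i += 1
def boot (word : String) (begin_boot : Int) (end_boot : Int) : String :=
  String.ofList <|
    (PySem.List.pyRange 0 (PySem.Str.len word) 1).foldl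
      (fun new_word i =>
        if begin_boot ≤ i ∧ i ≤ end_boot then new_word
        else new_word ++ [PySem.List.pyGetD word.toList i ' ']) []

-- ===== PORT B =====
-- lo = max(0, begin); hi = end+1; word if hi <= lo else word[:lo] + word[hi:]
def boot_alt (word : String) (begin_boot : Int) (end_boot : Int) : String :=
  let lo : Int := max 0 begin_boot
  let hi : Int := end_boot + 1
  if hi ≤ lo then word
  else String.ofList
    (PySem.List.slice word.toList none (some lo) ++ PySem.List.slice word.toList (some hi) none)

-- ===== PRECONDITION & SPEC =====
def Spec_boot (word : String) (begin_boot : Int) (end_boot : Int) (out : String) : Prop := out = boot_alt word begin_boot end_boot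
instance (word : String) (begin_boot : Int) (end_boot : Int) (out : String) : Decidable (Spec_boot word begin_boot end_boot out) := by unfold Spec_boot; infer_instance

-- ===== CLAIM (what is proved, stated in full; the proofs are below) =====
def Claim_equal_boot : Prop := ∀ (word : String) (begin_boot : Int) (end_boot : Int), Dom_boot word begin_boot end_boot → Spec_boot word begin_boot end_boot (boot word begin_boot end_boot)

-- ===== LEMMAS AND PROOFS =====

-- reading the first k entries of s with pyGetD is s.take k
lemma map_pyGetD_pyRange_take (s : List Char) (d : Char) (k : Int)
    (h : k ≤ (s.length : Int)) :
    (PySem.List.pyRange 0 k 1).map (fun j => PySem.List.pyGetD s j d) = s.take k.toNat := by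
  apply List.ext_getElem
  · simp [PySem.List.length_pyRange_one]
    omega
  · intro i h1 h2
    simp only [List.getElem_map, PySem.List.getElem_pyRange_one, zero_add, List.getElem_take]
    have hi : (i : Int) < (s.length : Int) := by
      simp [PySem.List.length_pyRange_one] at h1; omega
    rw [PySem.List.pyGetD_eq_getElem s d (by omega) hi]
    simp

-- A's loop, characterised: the kept characters are a prefix and a suffix of the word
lemma boot_eq_take_drop (s : List Char) (b e : Int) :
    (PySem.List.pyRange 0 (s.length : Int) 1).foldl
      (fun new_word i =>
        if b ≤ i ∧ i ≤ e then new_word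
        else new_word ++ [PySem.List.pyGetD s i ' ']) []
    = s.take (min (max 0 b) (s.length : Int)).toNat
      ++ s.drop (max (min (max 0 b) (s.length : Int)) (min (e + 1) (s.length : Int))).toNat := by
  set n : Int := (s.length : Int) with hn
  have hn0 : 0 ≤ n := by positivity
  set c1 : Int := min (max 0 b) n with hc1
  set c2 : Int := max c1 (min (e + 1) n) with hc2
  -- branch-swap into the foldl_append_ite shape
  rw [PySem.List.foldl_congr_mem _ _
      (fun new_word i => if ¬ (b ≤ i ∧ i ≤ e) then new_word ++ [PySem.List.pyGetD s i ' '] else new_word)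
      _ (by intro acc x _; by_cases hx : b ≤ x ∧ x ≤ e <;> simp [hx])]
  rw [PySem.List.foldl_append_ite]
  -- split the index range at c1 and c2
  rw [PySem.List.pyRange_one_append 0 c1 n (by omega) (by omega)]
  rw [PySem.List.pyRange_one_append c1 c2 n (by omega) (by omega)]
  rw [List.filter_append, List.filter_append]
  have h₁ : (PySem.List.pyRange 0 c1 1).filter (fun i => decide ¬(b ≤ i ∧ i ≤ e))
      = PySem.List.pyRange 0 c1 1 := by
    apply List.filter_eq_self.mpr
    intro i hi
    rw [PySem.List.mem_pyRange_one] at hi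
    simp only [decide_eq_true_eq]
    omega
  have h₂ : (PySem.List.pyRange c1 c2 1).filter (fun i => decide ¬(b ≤ i ∧ i ≤ e)) = [] := by
    apply List.filter_eq_nil_iff.mpr
    intro i hi
    rw [PySem.List.mem_pyRange_one] at hi
    simp only [decide_eq_true_eq]
    omega
  have h₃ : (PySem.List.pyRange c2 n 1).filter (fun i => decide ¬(b ≤ i ∧ i ≤ e))
      = PySem.List.pyRange c2 n 1 := by
    apply List.filter_eq_self.mpr
    intro i hi
    rw [PySem.List.mem_pyRange_one] at hi
    simp only [decide_eq_true_eq]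
    omega
  rw [h₁, h₂, h₃]
  simp only [List.map_append, List.nil_append]
  rw [map_pyGetD_pyRange_take s ' ' c1 (by omega)]
  rw [PySem.List.map_pyGetD_pyRange' s ' ' (a := c2) (by omega)]

-- ===== VERDICT (by name: the statement is the Claim_ definition above) =====
theorem boot_spec : Claim_equal_boot := by
  intro word b e _
  unfold Spec_boot boot boot_alt
  simp only [PySem.Str.len_eq]
  rw [boot_eq_take_drop word.toList b e]
  set s : List Char := word.toList with hs
  set n : Int := (s.length : Int) with hn
  have hn0 : 0 ≤ n := by positivity
  by_cases hle : e + 1 ≤ max 0 b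
  · -- removal range empty: everything is kept
    rw [if_pos hle]
    have hc : max (min (max 0 b) n) (min (e + 1) n) = min (max 0 b) n := by omega
    rw [hc, List.take_append_drop]
    rw [hs]; exact String.ofList_toList
  · rw [if_neg hle]
    rw [PySem.List.slice_to s (by omega), PySem.List.slice_from s (by omega)]
    have ht : s.take (min (max 0 b) n).toNat = s.take (max 0 b).toNat := by
      by_cases h : max 0 b ≤ n
      · congr 1; omega
      · rw [List.take_of_length_le (by omega), List.take_of_length_le (by omega)]
    have hd : s.drop (max (min (max 0 b) n) (min (e + 1) n)).toNat = s.drop (e + 1).toNat := by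
      have : max (min (max 0 b) n) (min (e + 1) n) = min (e + 1) n := by omega
      rw [this]
      by_cases h : e + 1 ≤ n
      · congr 1; omega
      · rw [List.drop_of_length_le (by omega), List.drop_of_length_le (by omega)]
    rw [ht, hd]
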